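-- pv_equiv track=rewrite | github.com/EllenMHuffman/code_jam_2018 | saving_universe_again.py | compute_damage
-- ===== SOURCE A (Python) =====
-- def compute_damage(instructions):
--     """Given a string of robot instructions, return int of damage.
--
--     >>> compute_damage('CS')
--     2
--     >>> compute_damage('SCCSSC')
--     9
--
--     """
--
--     damage = 0
--     charge = 1
--
--     for step in instructions:
--         if step.upper() == 'C':
--             charge *= 2
--         if step.upper() == 'S':
--             damage += charge
--
--     return damage
-- ===== SOURCE B (Python) =====
-- def compute_damage(instructions):
--     """Given a string of robot instructions, return int of damage.
--
--     Each 'S' deals 2**k damage, where k is the number of 'C's before it.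
--     """
--     u = instructions.upper()
--     return sum(2 ** u[:i].count('C') for i, ch in enumerate(u) if ch == 'S')
-- ===== Notes on version B (the rewrite author's own statement) =====
-- stated objective: alternative
-- what changed: Replaces A's single pass threading a doubling charge accumulator with a per-'S' comprehension that sums 2**(number of 'C's in the prefix before each 'S') over the upper-cased string.
import Mathlib
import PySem

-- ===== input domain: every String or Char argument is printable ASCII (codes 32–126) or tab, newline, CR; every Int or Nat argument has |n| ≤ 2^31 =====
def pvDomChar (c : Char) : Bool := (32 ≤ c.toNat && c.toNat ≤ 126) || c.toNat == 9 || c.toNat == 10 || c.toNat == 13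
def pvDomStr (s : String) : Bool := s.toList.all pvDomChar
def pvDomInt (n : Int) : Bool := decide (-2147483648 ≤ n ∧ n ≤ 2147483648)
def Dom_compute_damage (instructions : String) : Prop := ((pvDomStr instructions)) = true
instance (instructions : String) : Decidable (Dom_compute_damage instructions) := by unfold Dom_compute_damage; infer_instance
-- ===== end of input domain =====

-- B sums 2^(#C before each S) over the upper-cased string instead of threading A's doubling charge; alternative decomposition, same results.

-- ===== PORT A =====
-- for step in instructions: if step.upper()=='C': charge*=2 ; if step.upper()=='S': damage+=charge
def compute_damage (instructions : String) : Int :=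
  let st := instructions.toList.foldl (fun (p : Int × Int) step =>
    let p1 := if PySem.Chars.upperChar step == 'C' then (p.1, p.2 * 2) else p
    if PySem.Chars.upperChar step == 'S' then (p1.1 + p1.2, p1.2) else p1) (0, 1)
  st.1

-- ===== PORT B =====
-- u = instructions.upper(); sum(2 ** u[:i].count('C') for i, ch in enumerate(u) if ch == 'S')
def compute_damage_alt (instructions : String) : Int :=
  let u := PySem.Chars.upper instructions.toList
  (PySem.List.enumerate u 0).foldl (fun (acc : Int) p =>
    if p.2 == 'S' then acc + 2 ^ ((PySem.List.slice u none (some p.1)).count 'C') else acc) 0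

-- ===== PRECONDITION & SPEC =====
def Spec_compute_damage (instructions : String) (out : Int) : Prop := out = compute_damage_alt instructions
instance (instructions : String) (out : Int) : Decidable (Spec_compute_damage instructions out) := by unfold Spec_compute_damage; infer_instance

-- ===== CLAIM (what is proved, stated in full; the proofs are below) =====
def Claim_equal_compute_damage : Prop := ∀ (instructions : String), Dom_compute_damage instructions → Spec_compute_damage instructions (compute_damage instructions)

-- ===== LEMMAS AND PROOFS =====

-- shared characterisation: total damage of a suffix, 2 per preceding C
def pvG (l : List Char) : Int :=
  match l with
  | [] => 0
  | x :: xs =>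
    if x == 'C' then 2 * pvG xs
    else if x == 'S' then 1 + pvG xs
    else pvG xs

-- A's loop body, named for the lemmas (definitionally the lambda inside compute_damage)
def pvStepA (p : Int × Int) (step : Char) : Int × Int :=
  let p1 := if PySem.Chars.upperChar step == 'C' then (p.1, p.2 * 2) else p
  if PySem.Chars.upperChar step == 'S' then (p1.1 + p1.2, p1.2) else p1

theorem pvA_inv (l : List Char) (d c : Int) :
    (l.foldl pvStepA (d, c)).1 = d + c * pvG (l.map PySem.Chars.upperChar) := by
  induction l generalizing d c with
  | nil => simp [pvG]
  | cons x xs ih =>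
    rw [List.foldl_cons]
    by_cases hC : PySem.Chars.upperChar x = 'C'
    · have hfx : pvStepA (d, c) x = (d, c * 2) := by simp [pvStepA, hC]
      rw [hfx, ih]
      simp [List.map, pvG, hC]; ring
    · by_cases hS : PySem.Chars.upperChar x = 'S'
      · have hfx : pvStepA (d, c) x = (d + c, c) := by simp [pvStepA, hS]
        rw [hfx, ih]
        simp [List.map, pvG, hS]; ring
      · have hfx : pvStepA (d, c) x = (d, c) := by simp [pvStepA, hC, hS]
        rw [hfx, ih]
        simp [List.map, pvG, hC, hS]

theorem pvB_inv (u pre suf : List Char) (h : u = pre ++ suf) (acc : Int) :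
    ((PySem.List.enumerate suf (pre.length : Int)).foldl (fun (acc : Int) p =>
      if p.2 == 'S' then acc + 2 ^ ((PySem.List.slice u none (some p.1)).count 'C') else acc) acc)
    = acc + 2 ^ (pre.count 'C') * pvG suf := by
  induction suf generalizing pre acc with
  | nil => simp [PySem.List.enumerate_nil, pvG]
  | cons x xs ih =>
    rw [PySem.List.enumerate_cons]
    simp only [List.foldl]
    have hslice : PySem.List.slice u none (some ((pre.length : Int))) = pre := by
      rw [PySem.List.slice_to_natCast, h, List.take_left]
    have hnext : ((pre.length : Int) + 1) = (((pre ++ [x]).length : Nat) : Int) := by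
      simp
    have happ : u = (pre ++ [x]) ++ xs := by simp [h]
    by_cases hS : x = 'S'
    · have hcnt : (pre ++ [x]).count 'C' = pre.count 'C' := by
        simp [List.count_append, hS]
      rw [hnext, ih (pre ++ [x]) happ]
      simp [hS, hslice, pvG]
      try ring
    · rw [hnext, ih (pre ++ [x]) happ]
      by_cases hC : x = 'C'
      · have hcnt : (pre ++ [x]).count 'C' = pre.count 'C' + 1 := by
          simp [List.count_append, hC]
        simp [hC, pvG, pow_succ]
        try ring
      · have hcnt : (pre ++ [x]).count 'C' = pre.count 'C' := by
          simp [List.count_append, hC]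
        simp [hS, hC, hcnt, pvG]

-- ===== VERDICT (by name: the statement is the Claim_ definition above) =====
theorem compute_damage_spec : Claim_equal_compute_damage := by
  intro s _
  show compute_damage s = compute_damage_alt s
  unfold compute_damage compute_damage_alt
  have hupper : PySem.Chars.upper s.toList = s.toList.map PySem.Chars.upperChar := rfl
  simp only [hupper]
  rw [show (fun (p : Int × Int) step =>
      let p1 := if PySem.Chars.upperChar step == 'C' then (p.1, p.2 * 2) else p
      if PySem.Chars.upperChar step == 'S' then (p1.1 + p1.2, p1.2) else p1) = pvStepA from rfl]
  rw [show (0 : Int) = ((([] : List Char).length : Nat) : Int) by simp]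
  rw [pvB_inv (s.toList.map PySem.Chars.upperChar) [] (s.toList.map PySem.Chars.upperChar) (by simp)]
  rw [pvA_inv]
  simp
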